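-- pv_equiv track=rewrite | github.com/aorursy/KT_dataset_py | l166358_learn-python-for-data-science-5a2470.py | anagramSolution
-- ===== SOURCE A (Python) =====
-- def anagramSolution(string1,string2):
--     alist = list(string2)
--     pos = 0
--     stillOK = True
--
--     while pos < len(string1) and stillOK:
--         posx = 0
--         found = False
--         while posx < len(alist) and not found:
--             if string1[pos] == alist[posx]:
--                 found = True
--             else:
--                 posx = posx + 1
--         if found:
--             alist[posx] = None
--         else:
--             stillOK = False
--
--         pos = pos + 1
--     return stillOK
-- ===== SOURCE B (Python) =====
-- def anagramSolution(string1, string2):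
--     counts = {}
--     for c in string2:
--         counts[c] = counts.get(c, 0) + 1
--     for c in string1:
--         n = counts.get(c, 0)
--         if n == 0:
--             return False
--         counts[c] = n - 1
--     return True
-- ===== Notes on version B (the rewrite author's own statement) =====
-- stated objective: faster
-- what changed: Replaced A's per-character linear scan of a mutable copy of string2 (with None markers) by a single counting pass that builds a character-count dict of string2 and then decrements it while walking string1.
import Mathlib
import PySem

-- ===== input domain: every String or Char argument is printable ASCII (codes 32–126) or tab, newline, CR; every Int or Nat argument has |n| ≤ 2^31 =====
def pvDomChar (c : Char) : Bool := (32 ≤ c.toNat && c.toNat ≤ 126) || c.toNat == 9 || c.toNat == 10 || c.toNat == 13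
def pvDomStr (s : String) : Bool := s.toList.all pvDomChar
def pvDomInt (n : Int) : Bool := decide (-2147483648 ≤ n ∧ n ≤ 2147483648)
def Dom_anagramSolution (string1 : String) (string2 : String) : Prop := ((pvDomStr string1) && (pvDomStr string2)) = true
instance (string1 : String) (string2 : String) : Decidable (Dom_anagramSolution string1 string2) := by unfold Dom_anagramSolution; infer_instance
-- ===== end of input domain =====

-- B replaces A's per-character linear scan of a None-marked copy of string2 by a counting
-- dict built in one pass and decremented along string1 (objective: faster, O(n+m) vs O(n*m)).

-- ===== PORT A =====
-- inner while: scan alist from posx = 0 until string1[pos] == alist[posx]; returns the index found (None slots never match a char)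
def anagramSolutionFind (c : Char) : List (Option Char) → Option Nat
  | [] => none
  | x :: xs => if some c = x then some 0 else (anagramSolutionFind c xs).map (· + 1)

-- outer while over string1 with state alist; 'alist[posx] = None' on found, stillOK = False (stop) otherwise
def anagramSolutionLoop : List Char → List (Option Char) → Bool
  | [], _ => true
  | c :: cs, alist =>
    match anagramSolutionFind c alist with
    | some posx => anagramSolutionLoop cs (alist.set posx none)
    | none => false

def anagramSolution (string1 : String) (string2 : String) : Bool :=
  anagramSolutionLoop string1.toList (string2.toList.map some)

-- ===== PORT B =====
-- second loop of Source B: decrement the count of each char of string1, early False when it is 0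
def anagramSolutionAltLoop : List Char → PySem.Dict Char Int → Bool
  | [], _ => true
  | c :: cs, counts =>
    let n := counts.getD c 0
    if n = 0 then false
    else anagramSolutionAltLoop cs (counts.insert c (n - 1))

def anagramSolution_alt (string1 : String) (string2 : String) : Bool :=
  anagramSolutionAltLoop string1.toList
    (string2.toList.foldl (fun d c => d.insert c (d.getD c 0 + 1)) PySem.Dict.empty)

-- ===== PRECONDITION & SPEC =====
def Spec_anagramSolution (string1 : String) (string2 : String) (out : Bool) : Prop := out = anagramSolution_alt string1 string2
instance (string1 : String) (string2 : String) (out : Bool) : Decidable (Spec_anagramSolution string1 string2 out) := by unfold Spec_anagramSolution; infer_instance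

-- ===== CLAIM (what is proved, stated in full; the proofs are below) =====
def Claim_equal_anagramSolution : Prop := ∀ (string1 : String) (string2 : String), Dom_anagramSolution string1 string2 → Spec_anagramSolution string1 string2 (anagramSolution string1 string2)

-- ===== LEMMAS AND PROOFS =====

-- canonical form: sequential consumption seen only through per-character counts
def pvGo : List Char → (Char → Nat) → Bool
  | [], _ => true
  | c :: cs, f => if f c = 0 then false else pvGo cs (fun c' => if c' = c then f c - 1 else f c')

theorem find_none (c : Char) (l : List (Option Char)) :
    anagramSolutionFind c l = none ↔ l.count (some c) = 0 := by
  induction l with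
  | nil => simp [anagramSolutionFind]
  | cons x xs ih =>
    by_cases h : some c = x <;> simp [anagramSolutionFind, h, ih, Ne.symm]

theorem find_set_count (c : Char) (l : List (Option Char)) (i : Nat)
    (h : anagramSolutionFind c l = some i) (c' : Char) :
    (l.set i none).count (some c') = l.count (some c') - (if c' = c then 1 else 0) := by
  induction l generalizing i with
  | nil => simp [anagramSolutionFind] at h
  | cons x xs ih =>
    by_cases hx : some c = x
    · simp [anagramSolutionFind, hx] at h
      subst h
      subst hx
      by_cases hc : c' = c <;> simp [hc, Ne.symm]
    · simp [anagramSolutionFind, hx] at h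
      obtain ⟨j, hj, rfl⟩ := h
      by_cases hc : c' = c
      · subst hc
        have hxx : ¬ (x = some c') := fun h => hx h.symm
        simp [ih j hj, hxx]
      · simp [List.count_cons, ih j hj, hc]

theorem loopA_eq_pvGo (s1 : List Char) (l : List (Option Char)) :
    anagramSolutionLoop s1 l = pvGo s1 (fun c => l.count (some c)) := by
  induction s1 generalizing l with
  | nil => rfl
  | cons c cs ih =>
    cases h : anagramSolutionFind c l with
    | none =>
      have h0 := (find_none c l).mp h
      simp [anagramSolutionLoop, pvGo, h, h0]
    | some i =>
      have hne : l.count (some c) ≠ 0 := by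
        intro h0
        rw [← find_none c l] at h0
        simp [h0] at h
      have hf : (fun c' => (l.set i none).count (some c'))
          = (fun c' => if c' = c then l.count (some c) - 1 else l.count (some c')) := by
        funext c'
        rw [find_set_count c l i h c']
        by_cases hc : c' = c <;> simp [hc]
      simp [anagramSolutionLoop, pvGo, h, hne, ih, hf]

theorem loopB_eq_pvGo (s1 : List Char) (d : PySem.Dict Char Int) (f : Char → Nat)
    (hinv : ∀ c, d.getD c 0 = (f c : Int)) :
    anagramSolutionAltLoop s1 d = pvGo s1 f := by
  induction s1 generalizing d f with
  | nil => rfl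
  | cons c cs ih =>
    by_cases h0 : f c = 0
    · simp [anagramSolutionAltLoop, pvGo, hinv c, h0]
    · have hne : (d.getD c 0 = 0) = False := by simp [hinv c, h0]
      simp only [anagramSolutionAltLoop, pvGo, hne, if_false, h0]
      apply ih
      intro c'
      rw [PySem.Dict.getD_insert]
      by_cases hc : c' = c <;> simp [hc, hinv c', hinv c]
      omega

-- ===== VERDICT (by name: the statement is the Claim_ definition above) =====
theorem anagramSolution_spec : Claim_equal_anagramSolution := by
  intro s1 s2 _
  unfold Spec_anagramSolution anagramSolution anagramSolution_alt
  rw [loopA_eq_pvGo, PySem.Dict.foldl_insert_getD_add_one_eq_counter,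
      loopB_eq_pvGo _ _ (fun c => s2.toList.count c)
        (fun c => by rw [PySem.Dict.getD_counter])]
  congr 1
  funext c
  exact List.count_map_of_injective _ some (Option.some_injective Char) c
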